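-- pv_equiv track=rewrite | github.com/Zaargh/reddit_dailyprogrammer | splurthian_chemistry/splurth.py | count_blurthian_symbols
-- ===== SOURCE A (Python) =====
-- import itertools
--
-- def count_blurthian_symbols(name):
--     if len(name) < 2:
--         raise ValueError('Element name must be at least 2 chars long')
--
--     result = set()
--     for i, _ in enumerate(name, start=1):
--         possibilities = [''.join(p).capitalize() for p in itertools.combinations(name, i)]
--         result.update(possibilities)
--     return len(result)
-- ===== SOURCE B (Python) =====
-- def count_blurthian_symbols(name):
--     if len(name) < 2:
--         raise ValueError('Element name must be at least 2 chars long')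
--
--     # capitalize() maps a subsequence to its lower-cased form with the first
--     # char upper-cased, so distinct symbols = distinct non-empty subsequences
--     # of name.lower(): build that set in one left-to-right pass.
--     seen = {""}
--     for c in name.lower():
--         seen |= {s + c for s in seen}
--     return len(seen) - 1
-- ===== Notes on version B (the rewrite author's own statement) =====
-- stated objective: alternative
-- what changed: Instead of enumerating itertools.combinations of every length, capitalizing each tuple and deduplicating in one big set, B builds the set of distinct subsequences of name.lower() incrementally in one left-to-right pass (each step unions in the extensions of the current subsequences by the next character) and returns its size minus the empty string.
import Mathlib
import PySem

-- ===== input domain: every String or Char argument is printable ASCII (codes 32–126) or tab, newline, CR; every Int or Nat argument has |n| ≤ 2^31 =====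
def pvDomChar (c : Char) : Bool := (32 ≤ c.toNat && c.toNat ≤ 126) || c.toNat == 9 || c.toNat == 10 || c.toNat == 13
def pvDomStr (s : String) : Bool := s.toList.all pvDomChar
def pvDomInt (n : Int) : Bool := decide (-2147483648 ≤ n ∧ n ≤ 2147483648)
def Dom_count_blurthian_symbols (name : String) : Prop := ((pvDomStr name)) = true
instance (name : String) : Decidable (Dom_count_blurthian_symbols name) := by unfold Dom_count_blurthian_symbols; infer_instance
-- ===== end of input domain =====

-- B replaces A's per-length itertools.combinations enumeration (capitalize each tuple, dedup at
-- the end) by one left-to-right pass building the set of distinct subsequences of name.lower().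

-- ===== PORT A =====
-- ''.join(p).capitalize() for a tuple p of chars: first char upper-cased, the rest lower-cased
-- (exact on the printable-ASCII domain, where str.capitalize's title-casing = upper-casing).
def pvCap (cs : List Char) : List Char :=
  match cs with
  | [] => []
  | c :: rest => PySem.Chars.upperChar c :: rest.map PySem.Chars.lowerChar

def count_blurthian_symbols (name : String) : Int :=
  let cs := name.toList
  let result := (List.range cs.length).foldl
    (fun (result : PySem.Set (List Char)) i =>
      PySem.Set.update result ((PySem.List.combinations cs (i + 1)).map pvCap))
    PySem.Set.empty
  PySem.Set.len result

-- ===== PORT B =====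
def count_blurthian_symbols_alt (name : String) : Int :=
  let seen := (PySem.Chars.lower name.toList).foldl
    (fun (seen : PySem.Set (List Char)) c =>
      PySem.Set.union seen (seen.map (fun s => s ++ [c])))
    (PySem.Set.ofList [([] : List Char)])
  PySem.Set.len seen - 1

-- ===== PRECONDITION & SPEC =====
-- A (and B) raise ValueError on names shorter than 2 characters; nothing else raises.
def Pre_count_blurthian_symbols (name : String) : Prop := 2 ≤ name.toList.length
instance (name : String) : Decidable (Pre_count_blurthian_symbols name) := by
  unfold Pre_count_blurthian_symbols; infer_instance

def pvWitness_count_blurthian_symbols : String := "Ab"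

def Spec_count_blurthian_symbols (name : String) (out : Int) : Prop := out = count_blurthian_symbols_alt name
instance (name : String) (out : Int) : Decidable (Spec_count_blurthian_symbols name out) := by unfold Spec_count_blurthian_symbols; infer_instance

-- ===== CLAIM (what is proved, stated in full; the proofs are below) =====
def Claim_equal_count_blurthian_symbols : Prop := ∀ (name : String), Dom_count_blurthian_symbols name → Pre_count_blurthian_symbols name → Spec_count_blurthian_symbols name (count_blurthian_symbols name)

-- ===== LEMMAS AND PROOFS =====

theorem char_le_iff (a b : Char) : a ≤ b ↔ a.toNat ≤ b.toNat := by
  rw [Char.le_def, UInt32.le_iff_toNat_le]; rfl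

theorem toNat_ofNat_valid (n : Nat) (h : n < 0xD800) : (Char.ofNat n).toNat = n := by
  rw [Char.toNat_ofNat, if_pos]; exact Or.inl h

theorem char_eq_of_toNat (a b : Char) (h : a.toNat = b.toNat) : a = b := by
  rw [← Char.ofNat_toNat a, ← Char.ofNat_toNat b, h]

theorem lowerChar_upperChar (c : Char) :
    PySem.Chars.lowerChar (PySem.Chars.upperChar c) = PySem.Chars.lowerChar c := by
  unfold PySem.Chars.lowerChar PySem.Chars.upperChar PySem.Chars.isupper PySem.Chars.islower
  simp only [char_le_iff, Bool.and_eq_true, decide_eq_true_eq]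
  have ha : ('a' : Char).toNat = 97 := by decide
  have hz : ('z' : Char).toNat = 122 := by decide
  have hA : ('A' : Char).toNat = 65 := by decide
  have hZ : ('Z' : Char).toNat = 90 := by decide
  rw [ha, hz, hA, hZ]
  by_cases hl : 97 ≤ c.toNat ∧ c.toNat ≤ 122
  · rw [if_pos hl]
    have h1 : (Char.ofNat (c.toNat - 32)).toNat = c.toNat - 32 := toNat_ofNat_valid _ (by omega)
    rw [if_pos (by rw [h1]; omega), if_neg (by omega)]
    apply char_eq_of_toNat
    rw [toNat_ofNat_valid _ (by rw [h1]; omega), h1]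
    omega
  · rw [if_neg hl]

theorem upperChar_lowerChar (c : Char) :
    PySem.Chars.upperChar (PySem.Chars.lowerChar c) = PySem.Chars.upperChar c := by
  unfold PySem.Chars.lowerChar PySem.Chars.upperChar PySem.Chars.isupper PySem.Chars.islower
  simp only [char_le_iff, Bool.and_eq_true, decide_eq_true_eq]
  have ha : ('a' : Char).toNat = 97 := by decide
  have hz : ('z' : Char).toNat = 122 := by decide
  have hA : ('A' : Char).toNat = 65 := by decide
  have hZ : ('Z' : Char).toNat = 90 := by decide
  rw [ha, hz, hA, hZ]
  by_cases hu : 65 ≤ c.toNat ∧ c.toNat ≤ 90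
  · rw [if_pos hu]
    have h1 : (Char.ofNat (c.toNat + 32)).toNat = c.toNat + 32 := toNat_ofNat_valid _ (by omega)
    rw [if_pos (show 97 ≤ (Char.ofNat (c.toNat + 32)).toNat ∧ (Char.ofNat (c.toNat + 32)).toNat ≤ 122 by
          rw [h1]; constructor <;> omega),
        if_neg (show ¬(97 ≤ c.toNat ∧ c.toNat ≤ 122) by omega)]
    apply char_eq_of_toNat
    rw [toNat_ofNat_valid _ (by rw [h1]; omega), h1]
    omega
  · rw [if_neg hu]

theorem lowerChar_lowerChar (c : Char) :
    PySem.Chars.lowerChar (PySem.Chars.lowerChar c) = PySem.Chars.lowerChar c := by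
  unfold PySem.Chars.lowerChar PySem.Chars.isupper
  simp only [char_le_iff, Bool.and_eq_true, decide_eq_true_eq]
  have hA : ('A' : Char).toNat = 65 := by decide
  have hZ : ('Z' : Char).toNat = 90 := by decide
  rw [hA, hZ]
  by_cases hu : 65 ≤ c.toNat ∧ c.toNat ≤ 90
  · rw [if_pos hu]
    have h1 : (Char.ofNat (c.toNat + 32)).toNat = c.toNat + 32 := toNat_ofNat_valid _ (by omega)
    rw [if_neg (by rw [h1]; omega)]
  · rw [if_neg hu]
    rw [if_neg hu]

-- map lowerChar absorbs pvCap, and pvCap absorbs map lowerChar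
theorem lower_pvCap (t : List Char) :
    (pvCap t).map PySem.Chars.lowerChar = t.map PySem.Chars.lowerChar := by
  cases t with
  | nil => rfl
  | cons c r =>
    simp only [pvCap, List.map_cons, List.map_map, lowerChar_upperChar, List.cons.injEq, true_and]
    exact List.map_congr_left (fun x _ => lowerChar_lowerChar x)

theorem pvCap_lower (t : List Char) :
    pvCap (t.map PySem.Chars.lowerChar) = pvCap t := by
  cases t with
  | nil => rfl
  | cons c r =>
    simp only [List.map_cons, pvCap, upperChar_lowerChar, List.map_map, List.cons.injEq, true_and]
    exact List.map_congr_left (fun x _ => lowerChar_lowerChar x)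

-- ---- A's loop: membership and nodup ----

theorem memA_fold (cs : List Char) (is : List Nat) (s₀ : PySem.Set (List Char)) (x : List Char) :
    x ∈ is.foldl (fun (s : PySem.Set (List Char)) i =>
        PySem.Set.update s ((PySem.List.combinations cs (i + 1)).map pvCap)) s₀ ↔
      x ∈ s₀ ∨ ∃ i ∈ is, x ∈ (PySem.List.combinations cs (i + 1)).map pvCap := by
  induction is generalizing s₀ with
  | nil => simp
  | cons i rest ih =>
    rw [List.foldl_cons, ih, PySem.Set.mem_update]
    simp only [List.mem_cons]
    constructor
    · rintro ((h | h) | ⟨j, hj, hx⟩)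
      · exact Or.inl h
      · exact Or.inr ⟨i, Or.inl rfl, h⟩
      · exact Or.inr ⟨j, Or.inr hj, hx⟩
    · rintro (h | ⟨j, (rfl | hj), hx⟩)
      · exact Or.inl (Or.inl h)
      · exact Or.inl (Or.inr hx)
      · exact Or.inr ⟨j, hj, hx⟩

theorem nodupA_fold (cs : List Char) (is : List Nat) (s₀ : PySem.Set (List Char))
    (h : s₀.Nodup) :
    (is.foldl (fun (s : PySem.Set (List Char)) i =>
        PySem.Set.update s ((PySem.List.combinations cs (i + 1)).map pvCap)) s₀).Nodup := by
  induction is generalizing s₀ with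
  | nil => exact h
  | cons i rest ih => exact ih _ (PySem.Set.nodup_update _ _ h)

-- ---- B's loop: membership and nodup ----

theorem memB_fold (w : List Char) : ∀ (x : List Char),
    x ∈ w.foldl (fun (s : PySem.Set (List Char)) c =>
        PySem.Set.union s (s.map (fun t => t ++ [c]))) (PySem.Set.ofList [([] : List Char)]) ↔
      x.Sublist w := by
  induction w using List.reverseRecOn with
  | nil => intro x; simp [PySem.Set.ofList]
  | append_singleton w c ih =>
    intro x
    rw [List.foldl_append, List.foldl_cons, List.foldl_nil, PySem.Set.mem_union]
    constructor
    · rintro (h | h)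
      · exact (ih x |>.mp h).trans (List.sublist_append_left _ _)
      · rcases List.mem_map.mp h with ⟨y, hy, rfl⟩
        exact ((ih y |>.mp hy).append_right _).trans (by simp)
    · intro h
      rcases List.sublist_append_iff.mp h with ⟨l₁, l₂, rfl, h₁, h₂⟩
      rcases List.sublist_singleton.mp h₂ with rfl | rfl
      · rw [List.append_nil]
        exact Or.inl ((ih l₁).mpr (by simpa using h₁))
      · exact Or.inr (List.mem_map.mpr ⟨l₁, (ih l₁).mpr h₁, rfl⟩)

theorem nodupB_fold (w : List Char) :
    (w.foldl (fun (s : PySem.Set (List Char)) c =>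
        PySem.Set.union s (s.map (fun t => t ++ [c]))) (PySem.Set.ofList [([] : List Char)])).Nodup := by
  induction w using List.reverseRecOn with
  | nil => simp [PySem.Set.ofList]
  | append_singleton w c ih =>
    rw [List.foldl_append, List.foldl_cons, List.foldl_nil]
    exact PySem.Set.nodup_union _ _ ih

theorem toFinset_map_lists (f : List Char → List Char) (l : List (List Char)) :
    (l.map f).toFinset = l.toFinset.image f := by
  ext x; simp

-- ---- the counting argument ----

theorem card_image_cap_eq_lower (N : Finset (List Char)) :
    (N.image pvCap).card = (N.image (List.map PySem.Chars.lowerChar)).card := by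
  have h₁ : (N.image pvCap).image (List.map PySem.Chars.lowerChar)
      = N.image (List.map PySem.Chars.lowerChar) := by
    rw [Finset.image_image]
    exact Finset.image_congr (fun t _ => lower_pvCap t)
  have h₂ : (N.image (List.map PySem.Chars.lowerChar)).image pvCap = N.image pvCap := by
    rw [Finset.image_image]
    exact Finset.image_congr (fun t _ => pvCap_lower t)
  have le₁ : (N.image (List.map PySem.Chars.lowerChar)).card ≤ (N.image pvCap).card := by
    rw [← h₁]; exact Finset.card_image_le
  have le₂ : (N.image pvCap).card ≤ (N.image (List.map PySem.Chars.lowerChar)).card := by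
    rw [← h₂]; exact Finset.card_image_le
  omega

-- ===== VERDICT (by name: the statement is the Claim_ definition above) =====
theorem count_blurthian_symbols_spec : Claim_equal_count_blurthian_symbols := by
  intro name _ _
  unfold Spec_count_blurthian_symbols count_blurthian_symbols count_blurthian_symbols_alt
  set cs := name.toList with hcs
  -- the nonempty sublists of cs
  set N : Finset (List Char) := cs.sublists.toFinset.erase [] with hN
  -- A's set as a finset
  have hAfin : ((List.range cs.length).foldl
      (fun (s : PySem.Set (List Char)) i =>
        PySem.Set.update s ((PySem.List.combinations cs (i + 1)).map pvCap))
      PySem.Set.empty).toFinset = N.image pvCap := by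
    apply Finset.ext
    intro x
    rw [List.mem_toFinset, memA_fold]
    simp only [PySem.Set.empty, List.not_mem_nil, false_or, List.mem_range, List.mem_map,
      Finset.mem_image, hN, Finset.mem_erase, List.mem_toFinset, List.mem_sublists]
    constructor
    · rintro ⟨i, hi, t, ht, rfl⟩
      rcases (PySem.List.mem_combinations_iff cs (i + 1) t).mp ht with ⟨hsub, hlen⟩
      exact ⟨t, ⟨by intro h; subst h; simp at hlen, hsub⟩, rfl⟩
    · rintro ⟨t, ⟨hne, hsub⟩, rfl⟩
      have h1 : 1 ≤ t.length := by
        cases t with | nil => exact absurd rfl hne | cons a b => simp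
      have h2 : t.length ≤ cs.length := hsub.length_le
      exact ⟨t.length - 1, by omega, t,
        (PySem.List.mem_combinations_iff cs _ t).mpr ⟨hsub, by omega⟩, rfl⟩
  -- B's set as a finset
  have hBfin : ((PySem.Chars.lower cs).foldl
      (fun (s : PySem.Set (List Char)) c =>
        PySem.Set.union s (s.map (fun t => t ++ [c])))
      (PySem.Set.ofList [([] : List Char)])).toFinset
      = (PySem.Chars.lower cs).sublists.toFinset := by
    apply Finset.ext
    intro x
    rw [List.mem_toFinset, memB_fold, List.mem_toFinset, List.mem_sublists]
  -- B's finset = insert [] (image lower N)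
  have hBsplit : (PySem.Chars.lower cs).sublists.toFinset
      = insert [] (N.image (List.map PySem.Chars.lowerChar)) := by
    unfold PySem.Chars.lower
    rw [List.sublists_map, toFinset_map_lists]
    have : cs.sublists.toFinset = insert ([] : List Char) N := by
      rw [hN, Finset.insert_erase (by simp [List.mem_toFinset])]
    rw [this, Finset.image_insert]
    rfl
  have hnil : ([] : List Char) ∉ N.image (List.map PySem.Chars.lowerChar) := by
    rw [Finset.mem_image]
    rintro ⟨t, ht, h⟩
    rw [hN, Finset.mem_erase] at ht
    exact ht.1 (List.map_eq_nil_iff.mp h)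
  -- put lengths together
  simp only [PySem.Set.len]
  rw [
    ← List.toFinset_card_of_nodup (nodupA_fold cs _ _ (by simp [PySem.Set.empty])),
    ← List.toFinset_card_of_nodup (nodupB_fold (PySem.Chars.lower cs)),
    hAfin, hBfin, hBsplit, Finset.card_insert_of_notMem hnil,
    card_image_cap_eq_lower]
  push_cast
  ring
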